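-- pv_equiv track=rewrite | github.com/HassounLab/ASAP-SML | ASAP/FeatureExtraction.py | GetCDRH3Motif
-- ===== SOURCE A (Python) =====
-- def GetCDRH3Motif(ImpMotif, CDRH3, MotifDict):
--     Motif_CDRH3={}
--     for seq_name in CDRH3:
--         # seq_len = len(CDRH3[seq_name])
--         Motif_CDRH3[seq_name]=[0 for z in range(len(ImpMotif))]
--         for i in range(len(ImpMotif)):
--             if ImpMotif[i] in MotifDict[seq_name]:
--                 Motif_CDRH3[seq_name][i] = 1
--     return Motif_CDRH3
-- ===== SOURCE B (Python) =====
-- def GetCDRH3Motif(ImpMotif, CDRH3, MotifDict):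
--     pos = {}
--     for i, m in enumerate(ImpMotif):
--         pos.setdefault(m, []).append(i)
--     result = {}
--     for seq_name in CDRH3:
--         vec = [0] * len(ImpMotif)
--         for m in MotifDict[seq_name]:
--             for j in pos.get(m, ()):
--                 vec[j] = 1
--         result[seq_name] = vec
--     return result
-- ===== Notes on version B (the rewrite author's own statement) =====
-- stated objective: alternative
-- what changed: B builds an inverted index from each motif to its positions in ImpMotif once, then for each sequence loops over the sequence's own motif list setting those positions to 1, instead of testing every ImpMotif entry against the sequence's motif list; it trades A's per-sequence scan of ImpMotif for index construction plus motif-driven updates.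
import Mathlib
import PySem

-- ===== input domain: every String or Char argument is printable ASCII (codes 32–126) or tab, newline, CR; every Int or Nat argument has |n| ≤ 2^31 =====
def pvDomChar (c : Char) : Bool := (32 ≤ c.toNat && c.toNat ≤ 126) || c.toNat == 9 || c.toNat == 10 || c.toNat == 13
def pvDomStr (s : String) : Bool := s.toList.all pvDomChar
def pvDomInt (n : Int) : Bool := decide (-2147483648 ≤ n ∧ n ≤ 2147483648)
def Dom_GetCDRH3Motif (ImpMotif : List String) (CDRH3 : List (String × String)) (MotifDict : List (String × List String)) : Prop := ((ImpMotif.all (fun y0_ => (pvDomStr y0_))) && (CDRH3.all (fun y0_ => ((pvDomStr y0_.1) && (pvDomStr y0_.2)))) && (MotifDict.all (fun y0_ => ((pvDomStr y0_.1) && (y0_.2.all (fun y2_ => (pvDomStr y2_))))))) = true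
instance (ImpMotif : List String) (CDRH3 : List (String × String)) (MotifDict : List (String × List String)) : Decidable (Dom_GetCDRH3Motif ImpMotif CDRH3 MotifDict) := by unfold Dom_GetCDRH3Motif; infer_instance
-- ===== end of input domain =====

-- B replaces A's per-sequence scan over ImpMotif by an inverted index motif → positions,
-- so each sequence's own motif list drives the work (objective: alternative traversal).

-- ===== PORT A =====
-- one row of A: vec = [0]*n; for i in range(n): if ImpMotif[i] in ms: vec[i] = 1
-- (the row is built locally and then stored, as A only touches the freshly inserted entry)
def pvRowA (ImpMotif : List String) (ms : List String) : List Int :=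
  (List.range ImpMotif.length).foldl
    (fun v i => if ms.contains (ImpMotif.getD i "") then v.set i 1 else v)
    ((List.range ImpMotif.length).map (fun _ => (0 : Int)))

def GetCDRH3Motif (ImpMotif : List String) (CDRH3 : List (String × String)) (MotifDict : List (String × List String)) : List (String × List Int) :=
  (CDRH3.foldl
    (fun acc p =>
      acc.insert p.1 (pvRowA ImpMotif ((PySem.Dict.mk MotifDict).getD p.1 [])))
    PySem.Dict.empty).items
  -- getD [] is exact under Pre_ (every key of CDRH3 occurs in MotifDict; Python raises KeyError otherwise)

-- ===== PORT B =====
-- pos = {}; for i, m in enumerate(ImpMotif): pos.setdefault(m, []).append(i)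
-- (Python's enumerate indices are nonnegative, so Nat indices via zipIdx are exact)
def pvPos (ImpMotif : List String) : PySem.Dict String (List Nat) :=
  ImpMotif.zipIdx.foldl (fun d p => d.insert p.1 (d.getD p.1 [] ++ [p.2])) PySem.Dict.empty

-- one row of B: vec = [0]*n; for m in ms: for j in pos.get(m, ()): vec[j] = 1
def pvRowB (pos : PySem.Dict String (List Nat)) (n : Nat) (ms : List String) : List Int :=
  ms.foldl (fun v m => (pos.getD m []).foldl (fun v j => v.set j 1) v)
    (List.replicate n (0 : Int))

def GetCDRH3Motif_alt (ImpMotif : List String) (CDRH3 : List (String × String)) (MotifDict : List (String × List String)) : List (String × List Int) :=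
  let pos := pvPos ImpMotif
  (CDRH3.foldl
    (fun acc p =>
      acc.insert p.1 (pvRowB pos ImpMotif.length ((PySem.Dict.mk MotifDict).getD p.1 [])))
    PySem.Dict.empty).items

-- ===== PRECONDITION & SPEC =====
-- Pre_ excludes exactly the inputs where Python A raises KeyError: a sequence name of CDRH3 absent from MotifDict.
def Pre_GetCDRH3Motif (ImpMotif : List String) (CDRH3 : List (String × String)) (MotifDict : List (String × List String)) : Prop :=
  ∀ p ∈ CDRH3, (MotifDict.map Prod.fst).contains p.1 = true
instance (ImpMotif : List String) (CDRH3 : List (String × String)) (MotifDict : List (String × List String)) : Decidable (Pre_GetCDRH3Motif ImpMotif CDRH3 MotifDict) := by unfold Pre_GetCDRH3Motif; infer_instance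

def pvWitness_GetCDRH3Motif : List String × (List (String × String)) × (List (String × List String)) :=
  (["AB", "CD"], [("s1", "QQ")], [("s1", ["CD", "ZZ"])])

def Spec_GetCDRH3Motif (ImpMotif : List String) (CDRH3 : List (String × String)) (MotifDict : List (String × List String)) (out : List (String × List Int)) : Prop := out = GetCDRH3Motif_alt ImpMotif CDRH3 MotifDict
instance (ImpMotif : List String) (CDRH3 : List (String × String)) (MotifDict : List (String × List String)) (out : List (String × List Int)) : Decidable (Spec_GetCDRH3Motif ImpMotif CDRH3 MotifDict out) := by unfold Spec_GetCDRH3Motif; infer_instance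

-- ===== CLAIM (what is proved, stated in full; the proofs are below) =====
def Claim_equal_GetCDRH3Motif : Prop := ∀ (ImpMotif : List String) (CDRH3 : List (String × String)) (MotifDict : List (String × List String)), Dom_GetCDRH3Motif ImpMotif CDRH3 MotifDict → Pre_GetCDRH3Motif ImpMotif CDRH3 MotifDict → Spec_GetCDRH3Motif ImpMotif CDRH3 MotifDict (GetCDRH3Motif ImpMotif CDRH3 MotifDict)

-- ===== LEMMAS AND PROOFS =====

-- A's row fold: position j ends up 1 exactly when j < n and its motif is in ms.
theorem pvRowA_fold_getElem? (p : Nat → Bool) (n : Nat) (v : List Int) (j : Nat) :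
    ((List.range n).foldl (fun v i => if p i then v.set i 1 else v) v)[j]? =
      if j < n ∧ p j = true then v[j]?.map (fun _ => (1 : Int)) else v[j]? := by
  induction n generalizing v with
  | zero => simp
  | succ n ih =>
    rw [List.range_succ, List.foldl_append, List.foldl_cons, List.foldl_nil]
    by_cases hp : p n = true
    · rw [if_pos hp]
      by_cases hj : j = n
      · subst hj
        rw [List.getElem?_set_self', ih, if_neg (by omega), if_pos ⟨Nat.lt_succ_self j, hp⟩]
        cases v[j]? <;> rfl
      · rw [List.getElem?_set_ne (fun h => hj h.symm), ih]
        by_cases hc : j < n ∧ p j = true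
        · rw [if_pos hc, if_pos ⟨by omega, hc.2⟩]
        · rw [if_neg hc, if_neg (fun h => hc ⟨by omega, h.2⟩)]
    · rw [if_neg hp, ih]
      by_cases hc : j < n ∧ p j = true
      · rw [if_pos hc, if_pos ⟨by omega, hc.2⟩]
      · rw [if_neg hc, if_neg ?_]
        rintro ⟨h1, h2⟩
        by_cases hj : j = n
        · exact hp (hj ▸ h2)
        · exact hc ⟨by omega, h2⟩

-- B's inner fold (set 1 at every index of js).
theorem pvSetFold_getElem? (js : List Nat) (v : List Int) (j : Nat) :
    (js.foldl (fun v j => v.set j 1) v)[j]? =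
      if j ∈ js then v[j]?.map (fun _ => (1 : Int)) else v[j]? := by
  induction js generalizing v with
  | nil => simp
  | cons a t ih =>
    rw [List.foldl_cons, ih]
    by_cases ha : a = j
    · subst ha
      rw [List.getElem?_set_self', if_pos List.mem_cons_self]
      by_cases hj : a ∈ t
      · rw [if_pos hj]
        cases v[a]? <;> rfl
      · rw [if_neg hj]
        cases v[a]? <;> rfl
    · rw [List.getElem?_set_ne ha]
      by_cases hj : j ∈ t
      · rw [if_pos hj, if_pos (List.mem_cons_of_mem _ hj)]
      · rw [if_neg hj, if_neg ?_]
        intro h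
        rcases List.mem_cons.mp h with h | h
        · exact ha h.symm
        · exact hj h

-- B's outer fold over the sequence's motifs.
theorem pvRowB_fold_getElem? (posD : String → List Nat) (ms : List String) (v : List Int) (j : Nat) :
    (ms.foldl (fun v m => (posD m).foldl (fun v j => v.set j 1) v) v)[j]? =
      if ∃ m ∈ ms, j ∈ posD m then v[j]?.map (fun _ => (1 : Int)) else v[j]? := by
  induction ms generalizing v with
  | nil => simp
  | cons a t ih =>
    rw [List.foldl_cons, ih, pvSetFold_getElem?]
    by_cases ht : ∃ m ∈ t, j ∈ posD m
    · rw [if_pos ht]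
      have hc : ∃ m ∈ a :: t, j ∈ posD m := by
        rcases ht with ⟨m, hm, hjm⟩; exact ⟨m, List.mem_cons_of_mem _ hm, hjm⟩
      rw [if_pos hc]
      by_cases ha : j ∈ posD a
      · rw [if_pos ha]; cases v[j]? <;> rfl
      · rw [if_neg ha]
    · rw [if_neg ht]
      by_cases ha : j ∈ posD a
      · rw [if_pos ha, if_pos ⟨a, List.mem_cons_self, ha⟩]
      · rw [if_neg ha, if_neg ?_]
        rintro ⟨m, hm, hjm⟩
        rcases List.mem_cons.mp hm with rfl | hm
        · exact ha hjm
        · exact ht ⟨m, hm, hjm⟩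

-- the inverted index: pos.getD m [] collects exactly the indices of m in ImpMotif.
theorem pvPos_getD (l : List (String × Nat)) (d : PySem.Dict String (List Nat)) (m : String) :
    (l.foldl (fun d p => d.insert p.1 (d.getD p.1 [] ++ [p.2])) d).getD m [] =
      d.getD m [] ++ (l.filter (fun p => p.1 == m)).map Prod.snd := by
  induction l generalizing d with
  | nil => simp
  | cons a t ih =>
    rw [List.foldl_cons, ih, List.filter_cons]
    by_cases hm : a.1 = m
    · subst hm
      rw [PySem.Dict.getD_insert_self]
      simp
    · rw [PySem.Dict.getD_insert_of_ne _ _ _ (fun h => hm h.symm)]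
      simp [show (a.1 == m) = false from beq_false_of_ne hm]

theorem pvMem_pos (ImpMotif : List String) (m : String) (j : Nat) :
    (j ∈ (pvPos ImpMotif).getD m []) ↔ ImpMotif[j]? = some m := by
  unfold pvPos
  rw [pvPos_getD]
  have he : (PySem.Dict.empty : PySem.Dict String (List Nat)).getD m [] = [] := rfl
  rw [he, List.nil_append]
  constructor
  · intro h
    rcases List.mem_map.mp h with ⟨⟨x, i⟩, hmem, hsnd⟩
    rcases List.mem_filter.mp hmem with ⟨hz, hbeq⟩
    have hx : x = m := by simpa using hbeq
    cases hsnd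
    exact hx ▸ List.mk_mem_zipIdx_iff_getElem?.mp hz
  · intro h
    have hz : (m, j) ∈ ImpMotif.zipIdx := List.mk_mem_zipIdx_iff_getElem?.mpr h
    have hf : ((m, j) : String × Nat) ∈ (ImpMotif.zipIdx.filter (fun p => p.1 == m)) :=
      List.mem_filter.mpr ⟨hz, by simp⟩
    exact List.mem_map_of_mem hf

-- the two row computations agree.
theorem pvRow_eq (ImpMotif : List String) (ms : List String) :
    pvRowA ImpMotif ms = pvRowB (pvPos ImpMotif) ImpMotif.length ms := by
  apply List.ext_getElem?
  intro j
  unfold pvRowA pvRowB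
  rw [pvRowA_fold_getElem?, pvRowB_fold_getElem?]
  have hzero : ((List.range ImpMotif.length).map (fun _ => (0 : Int))) = List.replicate ImpMotif.length (0 : Int) := by
    rw [List.map_const', List.length_range]
  rw [hzero]
  have hcond : (∃ m ∈ ms, j ∈ (pvPos ImpMotif).getD m []) ↔ (j < ImpMotif.length ∧ ms.contains (ImpMotif.getD j "") = true) := by
    constructor
    · rintro ⟨m, hm, hj⟩
      rw [pvMem_pos] at hj
      rcases List.getElem?_eq_some_iff.mp hj with ⟨hlt, hget⟩
      refine ⟨hlt, ?_⟩
      rw [List.getD_eq_getElem _ _ hlt, hget]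
      exact List.contains_iff_mem.mpr hm
    · rintro ⟨hlt, hc⟩
      refine ⟨ImpMotif.getD j "", List.contains_iff_mem.mp hc, ?_⟩
      rw [pvMem_pos, List.getD_eq_getElem _ _ hlt]
      exact List.getElem?_eq_some_iff.mpr ⟨hlt, rfl⟩
  by_cases h : j < ImpMotif.length ∧ ms.contains (ImpMotif.getD j "") = true
  · rw [if_pos h, if_pos (hcond.mpr h)]
  · rw [if_neg h, if_neg (fun hx => h (hcond.mp hx))]

-- ===== VERDICT (by name: the statement is the Claim_ definition above) =====
theorem GetCDRH3Motif_spec : Claim_equal_GetCDRH3Motif := by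
  intro ImpMotif CDRH3 MotifDict _ _
  unfold Spec_GetCDRH3Motif GetCDRH3Motif GetCDRH3Motif_alt
  have hfun : (fun (acc : PySem.Dict String (List Int)) (p : String × String) =>
        acc.insert p.1 (pvRowA ImpMotif ((PySem.Dict.mk MotifDict).getD p.1 []))) =
      (fun acc p => acc.insert p.1 (pvRowB (pvPos ImpMotif) ImpMotif.length ((PySem.Dict.mk MotifDict).getD p.1 []))) := by
    funext acc p
    rw [pvRow_eq]
  rw [hfun]
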